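-- pv_equiv track=rewrite | github.com/krisunni/EdgeEar | code/ravensdr/wefax_scheduler.py | select_frequency
-- ===== SOURCE A (Python) =====
-- def select_frequency(frequencies, utc_hour):
--     """Select optimal HF frequency based on time of day.
--
--     Lower frequencies (4 MHz) propagate better at night.
--     Higher frequencies (8-12 MHz) propagate better during day.
--     UTC 06:00-18:00 = daytime for Pacific region.
--     """
--     if len(frequencies) <= 1:
--         return frequencies[0] if frequencies else None
--
--     if 6 <= utc_hour < 18:
--         # Daytime: prefer higher frequencies (8-12 MHz range)
--         candidates = [f for f in frequencies if f >= 8000]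
--         if candidates:
--             return min(candidates)  # lowest in the high range
--         return max(frequencies)
--     else:
--         # Nighttime: prefer lower frequencies (2-4 MHz range)
--         candidates = [f for f in frequencies if f <= 5000]
--         if candidates:
--             return max(candidates)  # highest in the low range
--         return min(frequencies)
-- ===== SOURCE B (Python) =====
-- def select_frequency(frequencies, utc_hour):
--     """Select optimal HF frequency based on time of day (single keyed max pass)."""
--     if not frequencies:
--         return None
--     if 6 <= utc_hour < 18:
--         # prefer the smallest high-range (>= 8000) frequency, else the largest overall
--         return max(frequencies, key=lambda f: (1, -f) if f >= 8000 else (0, f))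
--     # prefer the largest low-range (<= 5000) frequency, else the smallest overall
--     return max(frequencies, key=lambda f: (1, f) if f <= 5000 else (0, -f))
-- ===== Notes on version B (the rewrite author's own statement) =====
-- stated objective: idiomatic
-- what changed: Replaced the filter-candidates-then-min/max-with-fallback branching by a single max() pass over all frequencies with a composite (tier, value) key encoding the two-tier preference; the len<=1 special case disappears.
import Mathlib
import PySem

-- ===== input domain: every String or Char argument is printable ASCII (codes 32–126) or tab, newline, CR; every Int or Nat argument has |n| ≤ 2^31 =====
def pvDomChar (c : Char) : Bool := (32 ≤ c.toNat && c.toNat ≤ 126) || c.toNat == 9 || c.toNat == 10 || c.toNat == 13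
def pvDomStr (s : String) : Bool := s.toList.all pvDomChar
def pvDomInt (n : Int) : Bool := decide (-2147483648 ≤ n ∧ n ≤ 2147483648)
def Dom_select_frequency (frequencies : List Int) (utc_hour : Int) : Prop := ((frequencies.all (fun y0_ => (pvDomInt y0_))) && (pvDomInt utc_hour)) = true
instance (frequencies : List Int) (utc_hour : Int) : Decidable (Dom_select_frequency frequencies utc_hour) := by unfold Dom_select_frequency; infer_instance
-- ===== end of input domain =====

-- B replaces A's filter-candidates-plus-fallback branching by a single keyed max pass (more idiomatic, same cost).


-- ===== PORT A =====
def select_frequency (frequencies : List Int) (utc_hour : Int) : Option Int :=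
  if frequencies.length ≤ 1 then
    if frequencies ≠ [] then PySem.List.pyGet? frequencies 0 else none
  else if 6 ≤ utc_hour ∧ utc_hour < 18 then
    let candidates := frequencies.filter (fun f => decide (f ≥ 8000))
    if candidates ≠ [] then PySem.List.min? candidates (fun x => x)
    else PySem.List.max? frequencies (fun x => x)
  else
    let candidates := frequencies.filter (fun f => decide (f ≤ 5000))
    if candidates ≠ [] then PySem.List.max? candidates (fun x => x)
    else PySem.List.min? frequencies (fun x => x)

-- ===== PORT B =====
-- composite-key components of Source B's lambdas: (1, -f) if f >= 8000 else (0, f)  /  (1, f) if f <= 5000 else (0, -f)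
def dayK1 (f : Int) : Int := if f ≥ 8000 then 1 else 0
def dayK2 (f : Int) : Int := if f ≥ 8000 then -f else f
def nightK1 (f : Int) : Int := if f ≤ 5000 then 1 else 0
def nightK2 (f : Int) : Int := if f ≤ 5000 then f else -f

def select_frequency_alt (frequencies : List Int) (utc_hour : Int) : Option Int :=
  if frequencies = [] then none
  else if 6 ≤ utc_hour ∧ utc_hour < 18 then
    PySem.List.max2? frequencies dayK1 dayK2
  else
    PySem.List.max2? frequencies nightK1 nightK2

-- ===== PRECONDITION & SPEC =====
def Spec_select_frequency (frequencies : List Int) (utc_hour : Int) (out : Option Int) : Prop := out = select_frequency_alt frequencies utc_hour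
instance (frequencies : List Int) (utc_hour : Int) (out : Option Int) : Decidable (Spec_select_frequency frequencies utc_hour out) := by unfold Spec_select_frequency; infer_instance

-- ===== CLAIM (what is proved, stated in full; the proofs are below) =====
def Claim_equal_select_frequency : Prop := ∀ (frequencies : List Int) (utc_hour : Int), Dom_select_frequency frequencies utc_hour → Spec_select_frequency frequencies utc_hour (select_frequency frequencies utc_hour)

-- ===== LEMMAS AND PROOFS =====

-- lexicographic ≤ on the composite key (k1 x, k2 x)
def pvLexLE (k1 k2 : Int → Int) (a b : Int) : Prop :=
  k1 a < k1 b ∨ (k1 a = k1 b ∧ k2 a ≤ k2 b)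

-- the step function of PySem.List.max2? (named so the fold can be reasoned about)
def pvStep (k1 k2 : Int → Int) (acc : Option Int) (x : Int) : Option Int :=
  match acc with
  | none => some x
  | some m => if (decide (k1 m < k1 x) || !decide (k1 x < k1 m) && decide (k2 m < k2 x)) = true then some x else some m

lemma pvMax2_eq_foldl (k1 k2 : Int → Int) (xs : List Int) :
    PySem.List.max2? xs k1 k2 = List.foldl (pvStep k1 k2) none xs := by
  unfold PySem.List.max2?
  congr 1
  funext acc x
  cases acc <;> rfl

lemma pvMax2Go (k1 k2 : Int → Int) (t : List Int) : ∀ (m : Int),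
    ∃ r, List.foldl (pvStep k1 k2) (some m) t = some r ∧ (r = m ∨ r ∈ t) ∧
      pvLexLE k1 k2 m r ∧ ∀ y ∈ t, pvLexLE k1 k2 y r := by
  induction t with
  | nil =>
    intro m
    exact ⟨m, rfl, Or.inl rfl, Or.inr ⟨rfl, le_refl _⟩, by simp⟩
  | cons x t ih =>
    intro m
    by_cases hc : (decide (k1 m < k1 x) || !decide (k1 x < k1 m) && decide (k2 m < k2 x)) = true
    · obtain ⟨r, hfold, hmem, hle, hall⟩ := ih x
      have hmx : pvLexLE k1 k2 m x := by
        simp at hc; unfold pvLexLE; omega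
      have hstep : pvStep k1 k2 (some m) x = some x := by simp [pvStep, hc]
      refine ⟨r, ?_, ?_, ?_, ?_⟩
      · rw [List.foldl_cons, hstep]; exact hfold
      · rcases hmem with h | h
        · exact Or.inr (by simp [h])
        · exact Or.inr (List.mem_cons_of_mem _ h)
      · unfold pvLexLE at hmx hle ⊢; omega
      · intro y hy
        rcases List.mem_cons.mp hy with h | h
        · subst h; exact hle
        · exact hall y h
    · obtain ⟨r, hfold, hmem, hle, hall⟩ := ih m
      have hxm : pvLexLE k1 k2 x m := by
        simp at hc; unfold pvLexLE; omega
      have hstep : pvStep k1 k2 (some m) x = some m := by simp [pvStep, hc]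
      refine ⟨r, ?_, ?_, ?_, ?_⟩
      · rw [List.foldl_cons, hstep]; exact hfold
      · rcases hmem with h | h
        · exact Or.inl h
        · exact Or.inr (List.mem_cons_of_mem _ h)
      · exact hle
      · intro y hy
        rcases List.mem_cons.mp hy with h | h
        · subst h; unfold pvLexLE at hxm hle ⊢; omega
        · exact hall y h

lemma pvMax2Spec (k1 k2 : Int → Int) (x : Int) (t : List Int) :
    ∃ r, PySem.List.max2? (x :: t) k1 k2 = some r ∧ r ∈ x :: t ∧
      ∀ y ∈ x :: t, pvLexLE k1 k2 y r := by
  obtain ⟨r, hfold, hmem, hle, hall⟩ := pvMax2Go k1 k2 t x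
  refine ⟨r, ?_, ?_, ?_⟩
  · rw [pvMax2_eq_foldl]; exact hfold
  · rcases hmem with h | h
    · simp [h]
    · exact List.mem_cons_of_mem _ h
  · intro y hy
    rcases List.mem_cons.mp hy with h | h
    · subst h; exact hle
    · exact hall y h

lemma pvDay_antisymm (a b : Int) (h1 : pvLexLE dayK1 dayK2 a b) (h2 : pvLexLE dayK1 dayK2 b a) : a = b := by
  unfold pvLexLE dayK1 dayK2 at h1 h2
  split_ifs at h1 h2 <;> omega

lemma pvNight_antisymm (a b : Int) (h1 : pvLexLE nightK1 nightK2 a b) (h2 : pvLexLE nightK1 nightK2 b a) : a = b := by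
  unfold pvLexLE nightK1 nightK2 at h1 h2
  split_ifs at h1 h2 <;> omega

-- A's daytime branch equals the keyed max
lemma pvDay_eq (x : Int) (t : List Int) :
    (if (x :: t).filter (fun f => decide (f ≥ 8000)) ≠ [] then
        PySem.List.min? ((x :: t).filter (fun f => decide (f ≥ 8000))) (fun x => x)
      else PySem.List.max? (x :: t) (fun x => x)) = PySem.List.max2? (x :: t) dayK1 dayK2 := by
  obtain ⟨r, hr, hrmem, hrall⟩ := pvMax2Spec dayK1 dayK2 x t
  rw [hr]
  by_cases hc : (x :: t).filter (fun f => decide (f ≥ 8000)) ≠ []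
  · rw [if_pos hc]
    cases hmin : PySem.List.min? ((x :: t).filter (fun f => decide (f ≥ 8000))) (fun x => x) with
    | none => exact absurd ((PySem.List.min?_eq_none_iff _ _).mp hmin) hc
    | some a =>
      have hamem := PySem.List.min?_mem hmin
      have ha8 : a ≥ 8000 := by
        have := (List.mem_filter.mp hamem).2; simpa using this
      have hal : a ∈ x :: t := (List.mem_filter.mp hamem).1
      have h1 : pvLexLE dayK1 dayK2 a r := hrall a hal
      have h2 : pvLexLE dayK1 dayK2 r a := by
        by_cases hr8 : r ≥ 8000
        · have hrc : r ∈ (x :: t).filter (fun f => decide (f ≥ 8000)) :=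
            List.mem_filter.mpr ⟨hrmem, by simpa using hr8⟩
          have hle2 : a ≤ r := by simpa using PySem.List.min?_isMin hmin r hrc
          unfold pvLexLE dayK1 dayK2
          simp only [if_pos ha8, if_pos hr8]
          exact Or.inr ⟨trivial, by omega⟩
        · unfold pvLexLE dayK1 dayK2
          simp only [if_pos ha8, if_neg hr8]
          exact Or.inl (by norm_num)
      exact congrArg some (pvDay_antisymm a r h1 h2)
  · rw [if_neg hc]
    rw [not_not] at hc
    have hall8 : ∀ y ∈ x :: t, ¬ (y ≥ 8000) := by
      intro y hy h8
      have : y ∈ (x :: t).filter (fun f => decide (f ≥ 8000)) :=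
        List.mem_filter.mpr ⟨hy, by simpa using h8⟩
      simp [hc] at this
    cases hmax : PySem.List.max? (x :: t) (fun x => x) with
    | none => rw [PySem.List.max?_eq_none_iff] at hmax; simp at hmax
    | some a =>
      have hamem := PySem.List.max?_mem hmax
      have h1 : pvLexLE dayK1 dayK2 a r := hrall a hamem
      have h2 : pvLexLE dayK1 dayK2 r a := by
        have hle2 : r ≤ a := by simpa using PySem.List.max?_isMax hmax r hrmem
        unfold pvLexLE dayK1 dayK2
        simp only [if_neg (hall8 a hamem), if_neg (hall8 r hrmem)]
        exact Or.inr ⟨trivial, by omega⟩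
      exact congrArg some (pvDay_antisymm a r h1 h2)

-- A's nighttime branch equals the keyed max
lemma pvNight_eq (x : Int) (t : List Int) :
    (if (x :: t).filter (fun f => decide (f ≤ 5000)) ≠ [] then
        PySem.List.max? ((x :: t).filter (fun f => decide (f ≤ 5000))) (fun x => x)
      else PySem.List.min? (x :: t) (fun x => x)) = PySem.List.max2? (x :: t) nightK1 nightK2 := by
  obtain ⟨r, hr, hrmem, hrall⟩ := pvMax2Spec nightK1 nightK2 x t
  rw [hr]
  by_cases hc : (x :: t).filter (fun f => decide (f ≤ 5000)) ≠ []
  · rw [if_pos hc]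
    cases hmax : PySem.List.max? ((x :: t).filter (fun f => decide (f ≤ 5000))) (fun x => x) with
    | none => exact absurd ((PySem.List.max?_eq_none_iff _ _).mp hmax) hc
    | some a =>
      have hamem := PySem.List.max?_mem hmax
      have ha5 : a ≤ 5000 := by
        have := (List.mem_filter.mp hamem).2; simpa using this
      have hal : a ∈ x :: t := (List.mem_filter.mp hamem).1
      have h1 : pvLexLE nightK1 nightK2 a r := hrall a hal
      have h2 : pvLexLE nightK1 nightK2 r a := by
        by_cases hr5 : r ≤ 5000
        · have hrc : r ∈ (x :: t).filter (fun f => decide (f ≤ 5000)) :=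
            List.mem_filter.mpr ⟨hrmem, by simpa using hr5⟩
          have hle2 : r ≤ a := by simpa using PySem.List.max?_isMax hmax r hrc
          unfold pvLexLE nightK1 nightK2
          simp only [if_pos ha5, if_pos hr5]
          exact Or.inr ⟨trivial, by omega⟩
        · unfold pvLexLE nightK1 nightK2
          simp only [if_pos ha5, if_neg hr5]
          exact Or.inl (by norm_num)
      exact congrArg some (pvNight_antisymm a r h1 h2)
  · rw [if_neg hc]
    rw [not_not] at hc
    have hall5 : ∀ y ∈ x :: t, ¬ (y ≤ 5000) := by
      intro y hy h5
      have : y ∈ (x :: t).filter (fun f => decide (f ≤ 5000)) :=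
        List.mem_filter.mpr ⟨hy, by simpa using h5⟩
      simp [hc] at this
    cases hmin : PySem.List.min? (x :: t) (fun x => x) with
    | none => rw [PySem.List.min?_eq_none_iff] at hmin; simp at hmin
    | some a =>
      have hamem := PySem.List.min?_mem hmin
      have h1 : pvLexLE nightK1 nightK2 a r := hrall a hamem
      have h2 : pvLexLE nightK1 nightK2 r a := by
        have hle2 : a ≤ r := by simpa using PySem.List.min?_isMin hmin r hrmem
        unfold pvLexLE nightK1 nightK2
        simp only [if_neg (hall5 a hamem), if_neg (hall5 r hrmem)]
        exact Or.inr ⟨trivial, by omega⟩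
      exact congrArg some (pvNight_antisymm a r h1 h2)

-- ===== VERDICT (by name: the statement is the Claim_ definition above) =====
theorem select_frequency_spec : Claim_equal_select_frequency := by
  intro l h _
  unfold Spec_select_frequency select_frequency select_frequency_alt
  match l with
  | [] => simp
  | [x] => simp [PySem.List.pyGet?, PySem.List.pyIdx?, PySem.List.max2?]
  | x :: y :: t =>
    have hlen : ¬ ((x :: y :: t).length ≤ 1) := by simp
    rw [if_neg hlen]
    rw [if_neg (by simp : ¬ (x :: y :: t = []))]
    by_cases hday : 6 ≤ h ∧ h < 18
    · rw [if_pos hday, if_pos hday]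
      exact pvDay_eq x (y :: t)
    · rw [if_neg hday, if_neg hday]
      exact pvNight_eq x (y :: t)
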